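-- pv_equiv track=rewrite | github.com/KungCheops/aigrader | examples/assignment-03/assignment-03-R-00391587568123.py | returnAscending
-- ===== SOURCE A (Python) =====
-- def returnAscending(s_list):
--     counter=0
--     for i in range(1, len(s_list)):
--         if i==len(s_list)-1:
--             if s_list[i]>=s_list[i-1]:
--                 counter+=1
--                 yield s_list[i-counter:i+1]
--             else:
--                 if counter>0:
--                     yield s_list[i-counter-1:i]
--         else:
--             if s_list[i]>=s_list[i-1]:
--                 counter+=1
--             else:
--                 if counter > 0:
--                     yield s_list[i-counter-1:i]
--                 counter=0
-- ===== SOURCE B (Python) =====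
-- def returnAscending(s_list):
--     n = len(s_list)
--     bounds = [0] + [i for i in range(1, n) if s_list[i] < s_list[i - 1]] + [n]
--     for a, b in zip(bounds, bounds[1:]):
--         if b - a >= 2:
--             yield s_list[a:b]
-- ===== Notes on version B (the rewrite author's own statement) =====
-- stated objective: simpler
-- what changed: Replaces A's single stateful loop with a running counter and an inline last-index special case by a two-pass decomposition: first a breakpoint table (indices where the list descends), then one scan over consecutive boundary pairs yielding each slice of length >= 2.
import Mathlib
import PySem

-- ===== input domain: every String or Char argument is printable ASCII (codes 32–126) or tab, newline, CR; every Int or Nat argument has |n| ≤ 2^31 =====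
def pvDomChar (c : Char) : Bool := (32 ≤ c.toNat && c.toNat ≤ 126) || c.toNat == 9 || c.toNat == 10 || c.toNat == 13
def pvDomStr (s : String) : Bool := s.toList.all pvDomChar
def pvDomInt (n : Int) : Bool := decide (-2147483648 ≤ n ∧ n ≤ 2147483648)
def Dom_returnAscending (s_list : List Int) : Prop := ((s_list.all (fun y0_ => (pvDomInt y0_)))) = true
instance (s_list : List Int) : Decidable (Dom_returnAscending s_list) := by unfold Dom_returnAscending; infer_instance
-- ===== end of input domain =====

-- B replaces A's single stateful loop (running counter + last-index special case) by a two-pass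
-- breakpoint-table decomposition; A is a generator — equivalence is about the list of yielded values.

-- ===== PORT A =====
-- loop body of A's 'for i in range(1, len(s_list))', state = (counter, yields so far)
def returnAscendingStep (s_list : List Int) (st : Int × List (List Int)) (i : Int) :
    Int × List (List Int) :=
  if i = (s_list.length : Int) - 1 then
    if PySem.List.pyGetD s_list i 0 ≥ PySem.List.pyGetD s_list (i - 1) 0 then
      (st.1 + 1, st.2 ++ [PySem.List.slice s_list (some (i - (st.1 + 1))) (some (i + 1))])
    else
      if st.1 > 0 then
        (st.1, st.2 ++ [PySem.List.slice s_list (some (i - st.1 - 1)) (some i)])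
      else (st.1, st.2)
  else
    if PySem.List.pyGetD s_list i 0 ≥ PySem.List.pyGetD s_list (i - 1) 0 then
      (st.1 + 1, st.2)
    else
      if st.1 > 0 then
        (0, st.2 ++ [PySem.List.slice s_list (some (i - st.1 - 1)) (some i)])
      else (0, st.2)

def returnAscending (s_list : List Int) : List (List Int) :=
  ((PySem.List.pyRange 1 (s_list.length : Int) 1).foldl (returnAscendingStep s_list) (0, [])).2

-- ===== PORT B =====
def returnAscending_alt (s_list : List Int) : List (List Int) :=
  let n : Int := (s_list.length : Int)
  let bounds : List Int :=
    [0] ++ (PySem.List.pyRange 1 n 1).filter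
        (fun i => decide (PySem.List.pyGetD s_list i 0 < PySem.List.pyGetD s_list (i - 1) 0))
      ++ [n]
  ((bounds.zip bounds.tail).filter (fun ab => decide (ab.2 - ab.1 ≥ 2))).map
    (fun ab => PySem.List.slice s_list (some ab.1) (some ab.2))

-- ===== PRECONDITION & SPEC =====
def Spec_returnAscending (s_list : List Int) (out : List (List Int)) : Prop := out = returnAscending_alt s_list
instance (s_list : List Int) (out : List (List Int)) : Decidable (Spec_returnAscending s_list out) := by unfold Spec_returnAscending; infer_instance

-- ===== CLAIM (what is proved, stated in full; the proofs are below) =====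
def Claim_equal_returnAscending : Prop := ∀ (s_list : List Int), Dom_returnAscending s_list → Spec_returnAscending s_list (returnAscending s_list)

-- ===== LEMMAS AND PROOFS =====

-- 'there is a run break at index i' (s[i] < s[i-1])
def pvBrk (s : List Int) (i : Int) : Bool :=
  decide (PySem.List.pyGetD s i 0 < PySem.List.pyGetD s (i - 1) 0)

-- last break index ≤ k (0 if none): start of the run containing position k
def pvLb (s : List Int) : Nat → Int
  | 0 => 0
  | k + 1 => if pvBrk s ((k : Int) + 1) then (k : Int) + 1 else pvLb s k

def pvSeg (s : List Int) (a b : Int) : List Int := PySem.List.slice s (some a) (some b)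

-- segments fully closed by a break at an index ≤ k
def pvSegs (s : List Int) : Nat → List (List Int)
  | 0 => []
  | k + 1 => pvSegs s k ++
      (if pvBrk s ((k : Int) + 1) && decide (((k : Int) + 1) - pvLb s k ≥ 2) then
        [pvSeg s (pvLb s k) ((k : Int) + 1)] else [])

-- the break indices among 1..k, ascending
def pvBrks (s : List Int) : Nat → List Int
  | 0 => []
  | k + 1 => pvBrks s k ++ (if pvBrk s ((k : Int) + 1) then [(k : Int) + 1] else [])

-- B's pair scan over interior bounds (no final bound)
def pvH (s : List Int) : Int → List Int → List (List Int)
  | _, [] => []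
  | a, b :: bs => (if b - a ≥ 2 then [pvSeg s a b] else []) ++ pvH s b bs

theorem pvLb_bounds (s : List Int) (k : Nat) : 0 ≤ pvLb s k ∧ pvLb s k ≤ (k : Int) := by
  induction k with
  | zero => simp [pvLb]
  | succ k ih =>
    simp only [pvLb]
    split_ifs <;> push_cast <;> omega

theorem pvBrks_last (s : List Int) (k : Nat) : (pvBrks s k).getLastD 0 = pvLb s k := by
  induction k with
  | zero => simp [pvBrks, pvLb]
  | succ k ih =>
    simp only [pvBrks, pvLb]
    split_ifs with h
    · simp
    · simpa using ih

theorem pvH_append (s : List Int) (bs : List Int) (a c : Int) :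
    pvH s a (bs ++ [c]) =
      pvH s a bs ++ (if c - bs.getLastD a ≥ 2 then [pvSeg s (bs.getLastD a) c] else []) := by
  induction bs generalizing a with
  | nil => simp [pvH]
  | cons b bs ih =>
      simp only [List.cons_append, pvH, ih b, List.getLastD_cons, List.append_assoc]

theorem pvH_brks (s : List Int) (k : Nat) : pvH s 0 (pvBrks s k) = pvSegs s k := by
  induction k with
  | zero => simp [pvBrks, pvSegs, pvH]
  | succ k ih =>
    simp only [pvBrks, pvSegs]
    cases h : pvBrk s ((k : Int) + 1) with
    | false => simp [ih]
    | true =>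
      rw [if_pos rfl, pvH_append, pvBrks_last, ih]
      by_cases h2 : ((k : Int) + 1) - pvLb s k ≥ 2 <;> simp [h2]

theorem pvZip_char (s : List Int) (N : Int) (bs : List Int) (a : Int) :
    ((((a :: (bs ++ [N])).zip (bs ++ [N])).filter (fun ab => decide (ab.2 - ab.1 ≥ 2))).map
        (fun ab => PySem.List.slice s (some ab.1) (some ab.2))) =
      pvH s a bs ++ (if N - bs.getLastD a ≥ 2 then [pvSeg s (bs.getLastD a) N] else []) := by
  induction bs generalizing a with
  | nil =>
    simp only [List.nil_append, List.zip_cons_cons, List.zip_nil_right]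
    by_cases h : N - a ≥ 2 <;> simp [pvH, pvSeg, h]
  | cons b bs ih =>
    simp only [List.cons_append, List.zip_cons_cons, List.getLastD_cons]
    by_cases h : b - a ≥ 2 <;> simp [pvH, pvSeg, h, ih b]

theorem pvFilter_range (s : List Int) (k : Nat) :
    (PySem.List.pyRange 1 ((k : Int) + 1) 1).filter
        (fun i => decide (PySem.List.pyGetD s i 0 < PySem.List.pyGetD s (i - 1) 0)) =
      pvBrks s k := by
  induction k with
  | zero => simp [PySem.List.pyRange_one_eq_nil, pvBrks]
  | succ k ih =>
    push_cast
    rw [PySem.List.pyRange_one_succ_right (by omega), List.filter_append, ih]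
    simp only [pvBrks, List.filter_cons, List.filter_nil, pvBrk]
    split_ifs <;> simp_all

theorem pvA_inv (s : List Int) (k : Nat) (hk : (k : Int) ≤ (s.length : Int) - 2) :
    (PySem.List.pyRange 1 ((k : Int) + 1) 1).foldl (returnAscendingStep s) (0, []) =
      ((k : Int) - pvLb s k, pvSegs s k) := by
  induction k with
  | zero => simp [PySem.List.pyRange_one_eq_nil, pvLb, pvSegs]
  | succ k ih =>
    push_cast
    rw [PySem.List.pyRange_one_succ_right (by omega), List.foldl_append,
      ih (by push_cast at hk ⊢; omega)]
    simp only [List.foldl_cons, List.foldl_nil, returnAscendingStep]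
    have hne : ¬((k : Int) + 1 = (s.length : Int) - 1) := by push_cast at hk; omega
    have hm1 : ((k : Int) + 1) - 1 = (k : Int) := by ring
    rw [if_neg hne, hm1]
    by_cases hb : PySem.List.pyGetD s ((k : Int) + 1) 0 ≥ PySem.List.pyGetD s ((k : Int)) 0
    · rw [if_pos hb]
      have hbf : pvBrk s ((k : Int) + 1) = false := by
        simp only [pvBrk, hm1, decide_eq_false_iff_not, not_lt]; exact hb
      simp only [pvLb, pvSegs, hbf]
      simp
      ring
    · rw [if_neg hb]
      have hbt : pvBrk s ((k : Int) + 1) = true := by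
        simp only [pvBrk, hm1, decide_eq_true_eq]; exact lt_of_not_ge hb
      simp only [pvLb, pvSegs, hbt]
      have hlb := pvLb_bounds s k
      by_cases hc : (k : Int) - pvLb s k > 0
      · rw [if_pos hc]
        have h2 : ((k : Int) + 1) - pvLb s k ≥ 2 := by omega
        have hidx : ((k : Int) + 1) - ((k : Int) - pvLb s k) - 1 = pvLb s k := by ring
        simp [h2, pvSeg]
      · rw [if_neg hc]
        have h2 : ¬(((k : Int) + 1) - pvLb s k ≥ 2) := by omega
        simp [h2]

theorem pvB_char (s : List Int) (k : Nat) (hk : s.length = k + 1) :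
    returnAscending_alt s =
      pvSegs s k ++
        (if (s.length : Int) - pvLb s k ≥ 2 then [pvSeg s (pvLb s k) (s.length : Int)] else []) := by
  unfold returnAscending_alt
  simp only []
  rw [hk]
  rw [show ((k + 1 : Nat) : Int) = (k : Int) + 1 by push_cast; ring, pvFilter_range]
  have := pvZip_char s ((k : Int) + 1) (pvBrks s k) 0
  simp only [List.cons_append, List.nil_append, List.tail_cons] at this ⊢
  rw [this, pvBrks_last, pvH_brks]

-- ===== VERDICT (by name: the statement is the Claim_ definition above) =====
theorem returnAscending_spec : Claim_equal_returnAscending := by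
  intro s _
  unfold Spec_returnAscending
  match hn : s.length with
  | 0 =>
    have hs : s = [] := List.eq_nil_of_length_eq_zero hn
    subst hs; rfl
  | 1 =>
    unfold returnAscending returnAscending_alt
    rw [hn]
    simp [PySem.List.pyRange_one_eq_nil]
  | (k + 2) =>
    have hN : (s.length : Int) = (k : Int) + 2 := by rw [hn]; push_cast; ring
    rw [pvB_char s (k + 1) hn]
    unfold returnAscending
    rw [show (s.length : Int) = ((k : Int) + 1) + 1 by omega,
      PySem.List.pyRange_one_succ_right (by omega), List.foldl_append,
      show ((k : Int) + 1) = ((k : Nat) : Int) + 1 by ring,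
      pvA_inv s k (by omega)]
    simp only [List.foldl_cons, List.foldl_nil, returnAscendingStep]
    have heq : (k : Int) + 1 = (s.length : Int) - 1 := by omega
    have hm1 : ((k : Int) + 1) - 1 = (k : Int) := by ring
    have hlb := pvLb_bounds s k
    rw [if_pos heq, hm1]
    by_cases hb : PySem.List.pyGetD s ((k : Int) + 1) 0 ≥ PySem.List.pyGetD s ((k : Int)) 0
    · rw [if_pos hb]
      have hbf : pvBrk s ((k : Int) + 1) = false := by
        simp only [pvBrk, hm1, decide_eq_false_iff_not, not_lt]; exact hb
      simp only [pvLb, pvSegs, hbf, Bool.false_and]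
      have h2 : (s.length : Int) - pvLb s k ≥ 2 := by omega
      have hidx : ((k : Int) + 1) - (((k : Int) - pvLb s k) + 1) = pvLb s k := by ring
      have hend : ((k : Int) + 1) + 1 = (s.length : Int) := by omega
      simp [h2, hidx, hend, pvSeg]
    · rw [if_neg hb]
      have hbt : pvBrk s ((k : Int) + 1) = true := by
        simp only [pvBrk, hm1, decide_eq_true_eq]; exact lt_of_not_ge hb
      simp only [pvLb, pvSegs, hbt, Bool.true_and]
      by_cases hc : (k : Int) - pvLb s k > 0
      · rw [if_pos hc]
        have h2 : ((k : Int) + 1) - pvLb s k ≥ 2 := by omega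
        have hidx : ((k : Int) + 1) - ((k : Int) - pvLb s k) - 1 = pvLb s k := by ring
        simp [h2, pvSeg]
      · rw [if_neg hc]
        have h2 : ¬(((k : Int) + 1) - pvLb s k ≥ 2) := by omega
        simp [h2]
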